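-- pv_equiv track=rewrite | github.com/pradneshkolluru/CS316-Amazon | mini-amazon-skeleton-main/app/order.py | seller_order_fulfillment
-- ===== SOURCE A (Python) =====
-- def seller_order_fulfillment(filtered_orders):
--     orders_list = filtered_orders
--     orders = [] # if no orders for seller, orders is empty list
--     if orders_list:
--             orders = orders_list
--     order_fulfillment = {}
--     oids = []
--     for purchase in orders:
--         oid = purchase[0]
--         oids.append(oid)
--         purchase_fulfilled = purchase[4]
--         if oid in order_fulfillment:
--             if order_fulfillment[oid]:
--                 if not purchase_fulfilled:
--                     order_fulfillment[oid] = "Not fulfilled"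
--         else:
--             if purchase_fulfilled:
--                 order_fulfillment[oid] = "Fulfilled"
--             else:
--                 order_fulfillment[oid] = "Not fulfilled"
--
--     fulfillment_dict = {}
--     fulfillment_dict["Fulfilled"] = []
--     fulfillment_dict["Not fulfilled"] = []
--
--     for oid in order_fulfillment:
--         if order_fulfillment[oid] == "Fulfilled":
--             fulfillment_dict['Fulfilled'].append(oid)
--         else:
--             fulfillment_dict['Not fulfilled'].append(oid)
--     return fulfillment_dict
-- ===== SOURCE B (Python) =====
-- def seller_order_fulfillment(filtered_orders):
--     # Group-then-reduce: index purchases by order id, then classify each group.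
--     groups = {}
--     for purchase in (filtered_orders if filtered_orders else []):
--         groups.setdefault(purchase[0], []).append(purchase)
--     fulfilled = []
--     not_fulfilled = []
--     for oid, purchases in groups.items():
--         if all(p[4] for p in purchases):
--             fulfilled.append(oid)
--         else:
--             not_fulfilled.append(oid)
--     return {"Fulfilled": fulfilled, "Not fulfilled": not_fulfilled}
-- ===== Notes on version B (the rewrite author's own statement) =====
-- stated objective: alternative
-- what changed: Replaces A's incremental running-status reduction (a dict of 'Fulfilled'/'Not fulfilled' strings updated per purchase with nested membership branches) by a group-then-reduce shape: first pass groups purchases by order id via setdefault, second pass classifies each whole group with all(p[4]) and appends into two result lists assembled at the end.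
import Mathlib
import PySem

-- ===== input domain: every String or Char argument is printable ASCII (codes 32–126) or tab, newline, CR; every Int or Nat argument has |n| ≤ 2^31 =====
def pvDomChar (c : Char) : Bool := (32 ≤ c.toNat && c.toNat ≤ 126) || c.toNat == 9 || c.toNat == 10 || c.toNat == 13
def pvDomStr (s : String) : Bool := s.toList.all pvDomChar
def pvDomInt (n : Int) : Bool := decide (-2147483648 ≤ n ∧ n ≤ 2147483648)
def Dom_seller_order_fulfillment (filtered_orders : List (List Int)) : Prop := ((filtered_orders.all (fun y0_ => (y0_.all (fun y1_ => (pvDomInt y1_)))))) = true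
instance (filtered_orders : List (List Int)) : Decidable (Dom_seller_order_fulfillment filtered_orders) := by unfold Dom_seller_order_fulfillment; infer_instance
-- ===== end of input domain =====

-- B replaces A's incremental running-status reduction by a group-by-oid pass followed by an all(p[4]) classification per group (alternative decomposition, same cost).

-- ===== PORT A =====
-- one iteration of A's first loop over the order_fulfillment dict
def sofStepA (d : PySem.Dict Int String) (purchase : List Int) : PySem.Dict Int String :=
  let oid := PySem.List.pyGetD purchase 0 0
  let purchase_fulfilled := PySem.List.pyGetD purchase 4 0
  if d.contains oid then
    if d.getD oid "" ≠ "" then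
      if purchase_fulfilled = 0 then d.insert oid "Not fulfilled" else d
    else d
  else
    if purchase_fulfilled ≠ 0 then d.insert oid "Fulfilled" else d.insert oid "Not fulfilled"

def seller_order_fulfillment (filtered_orders : List (List Int)) : List (String × List Int) :=
  let orders_list := filtered_orders
  let orders : List (List Int) := if orders_list ≠ [] then orders_list else []
  -- first loop carries (order_fulfillment, oids); oids is built exactly as in A (and, as in A, never read)
  let st := orders.foldl
    (fun st purchase => (sofStepA st.1 purchase, st.2 ++ [PySem.List.pyGetD purchase 0 0]))
    ((PySem.Dict.empty : PySem.Dict Int String), ([] : List Int))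
  let order_fulfillment := st.1
  let fd0 : PySem.Dict String (List Int) :=
    (PySem.Dict.empty.insert "Fulfilled" []).insert "Not fulfilled" []
  let fd := order_fulfillment.keys.foldl
    (fun fd oid =>
      if order_fulfillment.getD oid "" = "Fulfilled" then fd.modify "Fulfilled" [] (· ++ [oid])
      else fd.modify "Not fulfilled" [] (· ++ [oid])) fd0
  fd.items

-- ===== PORT B =====
-- all(p[4] for p in purchases)
def sofAllFulfilled (purchases : List (List Int)) : Bool :=
  purchases.all (fun p => PySem.List.pyGetD p 4 0 != 0)

def seller_order_fulfillment_alt (filtered_orders : List (List Int)) : List (String × List Int) :=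
  let groups : PySem.Dict Int (List (List Int)) :=
    (if filtered_orders ≠ [] then filtered_orders else []).foldl
      (fun g purchase => g.modify (PySem.List.pyGetD purchase 0 0) [] (· ++ [purchase]))
      PySem.Dict.empty
  let res := groups.items.foldl
    (fun (r : List Int × List Int) kv =>
      if sofAllFulfilled kv.2 then (r.1 ++ [kv.1], r.2) else (r.1, r.2 ++ [kv.1]))
    (([] : List Int), ([] : List Int))
  [("Fulfilled", res.1), ("Not fulfilled", res.2)]

-- ===== PRECONDITION & SPEC =====
-- Pre_ excludes exactly the inputs on which Python A raises IndexError: a purchase row with fewer than 5 fields (purchase[4]).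
def Pre_seller_order_fulfillment (filtered_orders : List (List Int)) : Prop :=
  ∀ p ∈ filtered_orders, 5 ≤ p.length
instance (filtered_orders : List (List Int)) : Decidable (Pre_seller_order_fulfillment filtered_orders) := by unfold Pre_seller_order_fulfillment; infer_instance

def pvWitness_seller_order_fulfillment : List (List Int) :=
  [[1, 0, 0, 0, 1], [2, 0, 0, 0, 0], [1, 0, 0, 0, 1]]

def Spec_seller_order_fulfillment (filtered_orders : List (List Int)) (out : List (String × List Int)) : Prop := out = seller_order_fulfillment_alt filtered_orders
instance (filtered_orders : List (List Int)) (out : List (String × List Int)) : Decidable (Spec_seller_order_fulfillment filtered_orders out) := by unfold Spec_seller_order_fulfillment; infer_instance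

-- ===== CLAIM (what is proved, stated in full; the proofs are below) =====
def Claim_equal_seller_order_fulfillment : Prop := ∀ (filtered_orders : List (List Int)), Dom_seller_order_fulfillment filtered_orders → Pre_seller_order_fulfillment filtered_orders → Spec_seller_order_fulfillment filtered_orders (seller_order_fulfillment filtered_orders)

-- ===== LEMMAS AND PROOFS =====

-- the status string A maintains for an oid, as a function of the purchases B groups under it
def sofVal (purchases : List (List Int)) : String :=
  if sofAllFulfilled purchases then "Fulfilled" else "Not fulfilled"

def sofStepG (g : PySem.Dict Int (List (List Int))) (purchase : List Int) : PySem.Dict Int (List (List Int)) :=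
  g.modify (PySem.List.pyGetD purchase 0 0) [] (· ++ [purchase])

lemma sofVal_ne_empty (ps : List (List Int)) : sofVal ps ≠ "" := by
  unfold sofVal; split <;> decide

lemma sofVal_append (ps : List (List Int)) (p : List Int) :
    sofVal (ps ++ [p]) =
      if PySem.List.pyGetD p 4 0 = 0 then "Not fulfilled" else sofVal ps := by
  unfold sofVal sofAllFulfilled
  by_cases h : PySem.List.pyGetD p 4 0 = 0 <;> simp [List.all_append, h]

lemma sof_contains_eq (dA : PySem.Dict Int String) (dG : PySem.Dict Int (List (List Int)))
    (hkeys : dA.keys = dG.keys) (k : Int) : dA.contains k = dG.contains k := by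
  by_cases h : k ∈ dA.keys
  · rw [(PySem.Dict.contains_iff_mem_keys dA k).mpr h,
      (PySem.Dict.contains_iff_mem_keys dG k).mpr (hkeys ▸ h)]
  · have h2 : k ∉ dG.keys := hkeys ▸ h
    have e1 : dA.contains k = false := by
      rw [← Bool.not_eq_true]; simp [PySem.Dict.contains_iff_mem_keys, h]
    have e2 : dG.contains k = false := by
      rw [← Bool.not_eq_true]; simp [PySem.Dict.contains_iff_mem_keys, h2]
    rw [e1, e2]

-- invariant of the two first loops: equal key lists, and A's status = sofVal of B's group
lemma sof_loop1 (orders : List (List Int)) (dA : PySem.Dict Int String)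
    (dG : PySem.Dict Int (List (List Int)))
    (hkeys : dA.keys = dG.keys)
    (hval : ∀ k, dA.contains k = true → dA.getD k "" = sofVal (dG.getD k [])) :
    (orders.foldl sofStepA dA).keys = (orders.foldl sofStepG dG).keys ∧
    ∀ k, (orders.foldl sofStepA dA).contains k = true →
      (orders.foldl sofStepA dA).getD k "" = sofVal ((orders.foldl sofStepG dG).getD k []) := by
  induction orders generalizing dA dG with
  | nil => exact ⟨hkeys, hval⟩
  | cons p rest ih =>
    simp only [List.foldl_cons]
    set oid := PySem.List.pyGetD p 0 0 with hoid
    set flag := PySem.List.pyGetD p 4 0 with hflag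
    have hGstep : sofStepG dG p = dG.modify oid [] (· ++ [p]) := rfl
    have hGkeys : (sofStepG dG p).keys =
        (dG.insert oid (dG.getD oid [] ++ [p])).keys := by
      rw [hGstep, PySem.Dict.keys_modify]
    have hGgetD : ∀ k', (sofStepG dG p).getD k' [] =
        if k' = oid then dG.getD oid [] ++ [p] else dG.getD k' [] := by
      intro k'; rw [hGstep, PySem.Dict.getD_modify]
    by_cases hc : dA.contains oid = true
    · have hGc : dG.contains oid = true := (sof_contains_eq dA dG hkeys oid) ▸ hc
      have hv := hval oid hc
      have hne : dA.getD oid "" ≠ "" := by rw [hv]; exact sofVal_ne_empty _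
      have hGkeys' : (sofStepG dG p).keys = dG.keys := by
        rw [hGkeys, PySem.Dict.keys_insert_of_contains _ _ hGc]
      by_cases hf : flag = 0
      · have hA : sofStepA dA p = dA.insert oid "Not fulfilled" := by
          unfold sofStepA; rw [← hoid, ← hflag]; simp [hc, hne, hf]
        apply ih
        · rw [hA, PySem.Dict.keys_insert_of_contains _ _ hc, hGkeys', hkeys]
        · intro k hk
          rw [hA, PySem.Dict.getD_insert, hGgetD]
          by_cases hko : k = oid
          · rw [if_pos hko, if_pos hko, sofVal_append, if_pos hf]
          · rw [if_neg hko, if_neg hko]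
            apply hval
            rw [hA, PySem.Dict.contains_insert] at hk
            simpa [hko] using hk
      · have hA : sofStepA dA p = dA := by
          unfold sofStepA; rw [← hoid, ← hflag]; simp [hc, hne, hf]
        apply ih
        · rw [hA, hGkeys', hkeys]
        · intro k hk
          rw [hA, hGgetD]
          by_cases hko : k = oid
          · rw [if_pos hko, sofVal_append, if_neg hf, hko]
            exact hval oid hc
          · rw [if_neg hko]; exact hval k (hA ▸ hk)
    · have hGc : dG.contains oid = false := by
        have := sof_contains_eq dA dG hkeys oid
        simp only [Bool.not_eq_true] at hc; rw [← this, hc]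
      have hGempty : dG.getD oid [] = [] := PySem.Dict.getD_of_not_contains dG [] hGc
      have hGkeys' : (sofStepG dG p).keys = dG.keys ++ [oid] := by
        rw [hGkeys, PySem.Dict.keys_insert_of_not_contains _ _ hGc]
      simp only [Bool.not_eq_true] at hc
      have hA : sofStepA dA p =
          dA.insert oid (if flag ≠ 0 then "Fulfilled" else "Not fulfilled") := by
        unfold sofStepA; rw [← hoid, ← hflag]
        simp only [hc, Bool.false_eq_true, if_false]
        split <;> rfl
      apply ih
      · rw [hA, PySem.Dict.keys_insert_of_not_contains _ _ hc, hGkeys', hkeys]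
      · intro k hk
        rw [hA, PySem.Dict.getD_insert, hGgetD]
        by_cases hko : k = oid
        · rw [if_pos hko, if_pos hko, hGempty]
          unfold sofVal sofAllFulfilled
          by_cases hf : flag = 0 <;> simp [hf, ← hflag]
        · rw [if_neg hko, if_neg hko]
          apply hval
          rw [hA, PySem.Dict.contains_insert] at hk
          simpa [hko] using hk

-- A's second loop on the literal two-key dict
lemma sof_loop2A (d : PySem.Dict Int String) (ks f n : List Int) :
    (ks.foldl (fun fd oid =>
        if d.getD oid "" = "Fulfilled" then fd.modify "Fulfilled" [] (· ++ [oid])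
        else fd.modify "Not fulfilled" [] (· ++ [oid]))
      (PySem.Dict.mk [("Fulfilled", f), ("Not fulfilled", n)])).items =
    [("Fulfilled", f ++ ks.filter (fun k => decide (d.getD k "" = "Fulfilled"))),
     ("Not fulfilled", n ++ ks.filter (fun k => !decide (d.getD k "" = "Fulfilled")))] := by
  induction ks generalizing f n with
  | nil => simp
  | cons k rest ih =>
    by_cases hq : d.getD k "" = "Fulfilled"
    · have : (PySem.Dict.mk [("Fulfilled", f), ("Not fulfilled", n)]).modify "Fulfilled" []
          (· ++ [k]) = PySem.Dict.mk [("Fulfilled", f ++ [k]), ("Not fulfilled", n)] := by rfl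
      simp [hq, this, ih]
    · have : (PySem.Dict.mk [("Fulfilled", f), ("Not fulfilled", n)]).modify "Not fulfilled" []
          (· ++ [k]) = PySem.Dict.mk [("Fulfilled", f), ("Not fulfilled", n ++ [k])] := by rfl
      simp [hq, this, ih]

-- B's second loop
lemma sof_loop2B (l : List (Int × List (List Int))) (a b : List Int) :
    l.foldl (fun (r : List Int × List Int) kv =>
        if sofAllFulfilled kv.2 then (r.1 ++ [kv.1], r.2) else (r.1, r.2 ++ [kv.1])) (a, b) =
    (a ++ (l.filter (fun kv => sofAllFulfilled kv.2)).map (·.1),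
     b ++ (l.filter (fun kv => !sofAllFulfilled kv.2)).map (·.1)) := by
  induction l generalizing a b with
  | nil => simp
  | cons kv rest ih =>
    by_cases h : sofAllFulfilled kv.2 <;> simp [h, ih]

-- ===== VERDICT (by name: the statement is the Claim_ definition above) =====
theorem seller_order_fulfillment_spec : Claim_equal_seller_order_fulfillment := by
  intro fo _ _
  unfold Spec_seller_order_fulfillment seller_order_fulfillment seller_order_fulfillment_alt
  simp only []
  rw [PySem.List.foldl_prod_mk sofStepA
    (fun oids purchase => oids ++ [PySem.List.pyGetD purchase 0 0]) _ PySem.Dict.empty []]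
  have hfo : (if fo ≠ [] then fo else []) = fo := by
    by_cases h : fo = [] <;> simp [h]
  rw [hfo]
  set dA := fo.foldl sofStepA PySem.Dict.empty with hdA
  have hG : fo.foldl
      (fun g purchase => g.modify (PySem.List.pyGetD purchase 0 0) [] (· ++ [purchase]))
      PySem.Dict.empty = fo.foldl sofStepG PySem.Dict.empty := rfl
  rw [hG]
  set dG := fo.foldl sofStepG PySem.Dict.empty with hdG
  have hinv := sof_loop1 fo PySem.Dict.empty PySem.Dict.empty (by rfl)
    (by intro k hk; simp [PySem.Dict.contains_empty] at hk)
  rw [← hdA, ← hdG] at hinv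
  obtain ⟨hkeys, hval⟩ := hinv
  have hnodupG : dG.keys.Nodup := by
    rw [hdG]
    exact PySem.Dict.nodup_keys_foldl_modify_key fo
      (fun purchase => PySem.List.pyGetD purchase 0 0) []
      (fun _ purchase => (· ++ [purchase])) PySem.Dict.empty (by simp)
  have hitems : dG.items = dG.keys.map (fun k => (k, dG.getD k [])) :=
    PySem.Dict.items_eq_map_keys dG hnodupG []
  have hfd0 : ((PySem.Dict.empty : PySem.Dict String (List Int)).insert "Fulfilled" []).insert
      "Not fulfilled" [] = PySem.Dict.mk [("Fulfilled", []), ("Not fulfilled", [])] := by rfl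
  rw [hfd0, sof_loop2A dA dA.keys [] [],
    hitems, sof_loop2B]
  rw [List.filter_map, List.filter_map, List.map_map, List.map_map]
  have hmapid : ∀ (l : List Int), l.map ((fun p : Int × List (List Int) => p.1) ∘
      (fun k => (k, dG.getD k []))) = l := by
    intro l; simp [Function.comp_def]
  rw [hmapid, hmapid, hkeys]
  have hfilt : ∀ k ∈ dG.keys,
      (decide (dA.getD k "" = "Fulfilled")) =
      ((fun kv : Int × List (List Int) => sofAllFulfilled kv.2) ∘ fun k => (k, dG.getD k [])) k := by
    intro k hk
    have hc : dA.contains k = true := by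
      rw [sof_contains_eq dA dG hkeys k]
      exact (PySem.Dict.contains_iff_mem_keys dG k).mpr hk
    have hv := hval k hc
    simp only [Function.comp]
    rw [hv]
    unfold sofVal
    by_cases h : sofAllFulfilled (dG.getD k []) <;> simp [h]
  rw [List.filter_congr hfilt]
  have hfilt2 : ∀ k ∈ dG.keys,
      (!decide (dA.getD k "" = "Fulfilled")) =
      ((fun kv : Int × List (List Int) => !sofAllFulfilled kv.2) ∘ fun k => (k, dG.getD k [])) k := by
    intro k hk
    have h1 := hfilt k hk
    simp only [Function.comp_apply] at h1 ⊢
    rw [h1]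
  rw [List.filter_congr hfilt2]
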